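-- pv_equiv track=rewrite | github.com/joshanashakya/dissertation | workspace/dataset/java-python/GeeksForGeeks/3367/A/2.py | revAlternateK
-- ===== SOURCE A (Python) =====
-- def revAlternateK(s, k, Len):
--     i = 0
--
--     while(i < len(s)):
--
--         # If there are less than k characters
--         # starting from the current position
--         if (i + k > Len):
--             break
--
--         # Reverse first k characters
--         ss = s[i:i + k]
--         s = s[:i]+ss[::-1]+s[i + k:]
--
--         # Skip the next k characters
--         i += 2 * k
--
--     return s;
-- ===== SOURCE B (Python) =====
-- def revAlternateK(s, k, Len):
--     # One comprehension-driven pass over the k-spaced chunk offsets; a chunk is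
--     # reversed exactly when its block index is even and it fits below Len.
--     out = []
--     for j, p in enumerate(range(0, len(s), k)):
--         chunk = s[p:p + k]
--         out.append(chunk[::-1] if j % 2 == 0 and p + k <= Len else chunk)
--     return ''.join(out)
-- ===== Notes on version B (the rewrite author's own statement) =====
-- stated objective: alternative
-- what changed: Replaces A's in-place slice-splicing while-loop that jumps i by 2*k and breaks at the first incomplete even block with one pass over enumerate(range(0, len(s), k)) that collects every k-chunk, reversing a chunk exactly when its index is even and p + k <= Len, then joins the parts.
-- outside the precondition, e.g. on revAlternateK('ab', -5, -10): A returns 'ab', B returns ''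
import Mathlib
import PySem

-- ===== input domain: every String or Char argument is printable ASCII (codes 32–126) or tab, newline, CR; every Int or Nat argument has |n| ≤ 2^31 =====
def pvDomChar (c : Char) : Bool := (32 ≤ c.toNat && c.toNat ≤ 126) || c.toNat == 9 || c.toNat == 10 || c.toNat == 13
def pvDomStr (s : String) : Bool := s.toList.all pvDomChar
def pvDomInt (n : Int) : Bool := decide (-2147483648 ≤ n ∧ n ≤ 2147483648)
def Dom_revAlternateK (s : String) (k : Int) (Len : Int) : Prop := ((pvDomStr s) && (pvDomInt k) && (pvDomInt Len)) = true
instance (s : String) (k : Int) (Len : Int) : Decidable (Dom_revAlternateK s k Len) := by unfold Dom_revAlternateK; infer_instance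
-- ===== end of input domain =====

-- B replaces A's jump-by-2k slice-splicing loop with break by one pass over the
-- enumerated k-spaced chunk offsets, reversing the even-indexed fitting chunks
-- and joining the parts (objective: alternative).

-- ===== PORT A =====
-- A's while loop as fuel recursion (fuel = len(s)+1 bounds the iterations whenever
-- the Python loop terminates inside Pre_); ss[::-1] is ported as List.reverse
-- (= PySem.List.slice? ss none none (-1), lemma slice?_none_none_neg_one).
def pvLoopA (k Len : Int) : Nat → List Char → Int → List Char
  | 0, l, _ => l
  | fuel+1, l, i =>
    if i < (l.length : Int) then
      if i + k > Len then l
      else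
        let ss := PySem.List.slice l (some i) (some (i + k))
        pvLoopA k Len fuel
          (PySem.List.slice l none (some i) ++ ss.reverse ++ PySem.List.slice l (some (i + k)) none)
          (i + 2 * k)
    else l

def revAlternateK (s : String) (k : Int) (Len : Int) : String :=
  String.ofList (pvLoopA k Len (s.toList.length + 1) s.toList 0)

-- ===== PORT B =====
-- B's 'for j, p in enumerate(range(0, len(s), k))' is a map over the enumerated
-- pyRange of offsets; chunk[::-1] is List.reverse; ''.join is flatten.
def revAlternateK_alt (s : String) (k : Int) (Len : Int) : String :=
  String.ofList
    ((PySem.List.enumerate (PySem.List.pyRange 0 (s.toList.length : Int) k)).map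
      (fun jp =>
        let chunk := PySem.List.slice s.toList (some jp.2) (some (jp.2 + k))
        if PySem.Int.mod jp.1 2 == 0 && decide (jp.2 + k ≤ Len) then chunk.reverse else chunk)).flatten

-- ===== PRECONDITION & SPEC =====
-- Pre_ excludes nonpositive k with a nonempty s (there A's loop never advances:
-- it diverges, except for an accidental immediate break returning s unchanged,
-- while B returns the empty join), and k = 0 with empty s (B's range(0,0,0)
-- raises ValueError while A returns '').
def Pre_revAlternateK (s : String) (k : Int) (Len : Int) : Prop := 1 ≤ k ∨ (s = "" ∧ k ≠ 0)
instance (s : String) (k : Int) (Len : Int) : Decidable (Pre_revAlternateK s k Len) := by unfold Pre_revAlternateK; infer_instance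

def pvWitness_revAlternateK : String × Int × Int := ("abcdefg", 2, 7)

def Spec_revAlternateK (s : String) (k : Int) (Len : Int) (out : String) : Prop := out = revAlternateK_alt s k Len
instance (s : String) (k : Int) (Len : Int) (out : String) : Decidable (Spec_revAlternateK s k Len out) := by unfold Spec_revAlternateK; infer_instance

-- ===== CLAIM (what is proved, stated in full; the proofs are below) =====
def Claim_equal_revAlternateK : Prop := ∀ (s : String) (k : Int) (Len : Int), Dom_revAlternateK s k Len → Pre_revAlternateK s k Len → Spec_revAlternateK s k Len (revAlternateK s k Len)

-- ===== LEMMAS AND PROOFS =====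

-- proof-side intermediate: B's pass written as a fuel recursion over the offset i
def pvLoopB (k Len : Int) : Nat → List Char → Int → Int → List (List Char)
  | 0, _, _, _ => []
  | fuel+1, l, i, j =>
    if i < (l.length : Int) then
      let chunk := PySem.List.slice l (some i) (some (i + k))
      (if PySem.Int.mod j 2 == 0 && decide (i + k ≤ Len) then chunk.reverse else chunk)
        :: pvLoopB k Len fuel l (i + k) (j + 1)
    else []

-- pyRange with a positive step: nil and cons unfoldings
theorem pvRange_pos_nil (a b s : Int) (hs : 0 < s) (h : b ≤ a) :
    PySem.List.pyRange a b s = [] := by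
  rw [PySem.List.pyRange_of_pos a b hs, if_neg (by omega)]
  simp

theorem pvRange_pos_cons (a b s : Int) (hs : 0 < s) (hab : a < b) :
    PySem.List.pyRange a b s = a :: PySem.List.pyRange (a + s) b s := by
  rw [PySem.List.pyRange_of_pos a b hs, PySem.List.pyRange_of_pos (a + s) b hs]
  have hx : 0 ≤ b - a - 1 := by omega
  have hm : (if a < b then ((b - a + s - 1) / s).toNat else 0)
      = (if a + s < b then ((b - (a + s) + s - 1) / s).toNat else 0) + 1 := by
    rw [if_pos hab]
    have e : b - a + s - 1 = (b - a - 1) + 1 * s := by ring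
    by_cases h2 : a + s < b
    · rw [if_pos h2, e, Int.add_mul_ediv_right _ _ (by omega : s ≠ 0)]
      have e2 : b - (a + s) + s - 1 = b - a - 1 := by ring
      have h0 : 0 ≤ (b - a - 1) / s := Int.ediv_nonneg hx (by omega)
      rw [e2]
      omega
    · rw [if_neg h2, e, Int.add_mul_ediv_right _ _ (by omega : s ≠ 0)]
      have h0 : (b - a - 1) / s = 0 := Int.ediv_eq_zero_of_lt hx (by omega)
      rw [h0]
      rfl
  rw [hm, List.range_succ_eq_map, List.map_cons, List.map_map]
  congr 1
  · simp
  · apply List.map_congr_left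
    intro m _
    simp [Function.comp]
    push_cast
    ring

-- B's port equals the fuel recursion pvLoopB (k = kn ≥ 1)
theorem pvBridge (Len : Int) (kn : Nat) (hk1 : 1 ≤ kn) (l : List Char) :
    ∀ (fuel : Nat) (iN : Nat) (jN : Int), l.length - iN ≤ fuel →
    (PySem.List.enumerate (PySem.List.pyRange (iN : Int) (l.length : Int) (kn : Int)) jN).map
      (fun jp =>
        let chunk := PySem.List.slice l (some jp.2) (some (jp.2 + (kn : Int)))
        if PySem.Int.mod jp.1 2 == 0 && decide (jp.2 + (kn : Int) ≤ Len) then chunk.reverse else chunk)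
      = pvLoopB (kn : Int) Len fuel l (iN : Int) jN := by
  intro fuel
  induction fuel with
  | zero =>
    intro iN jN h
    have hle : (l.length : Int) ≤ (iN : Int) := by exact_mod_cast (by omega : l.length ≤ iN)
    rw [pvRange_pos_nil _ _ _ (by exact_mod_cast hk1) hle, PySem.List.enumerate_nil]
    rfl
  | succ f ih =>
    intro iN jN h
    by_cases hlt : iN < l.length
    · have hab : (iN : Int) < (l.length : Int) := by exact_mod_cast hlt
      rw [pvRange_pos_cons _ _ _ (by exact_mod_cast hk1) hab, PySem.List.enumerate_cons,
          List.map_cons]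
      have e1 : (iN : Int) + (kn : Int) = ((iN + kn : Nat) : Int) := by push_cast; ring
      rw [e1, ih (iN + kn) (jN + 1) (by omega)]
      simp only [pvLoopB, hab, if_pos, ← e1]
    · have hle : (l.length : Int) ≤ (iN : Int) := by exact_mod_cast (by omega : l.length ≤ iN)
      rw [pvRange_pos_nil _ _ _ (by exact_mod_cast hk1) hle, PySem.List.enumerate_nil]
      simp [pvLoopB, not_lt.mpr hle]

-- loopB returns [] past the end of the list, whatever the fuel
theorem pvLoopB_nil (k Len : Int) (fuel : Nat) (l : List Char) (iN : Nat) (j : Int)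
    (h : l.length ≤ iN) : pvLoopB k Len fuel l (iN : Int) j = [] := by
  cases fuel with
  | zero => simp [pvLoopB]
  | succ f => simp [pvLoopB]; omega

-- loopB ignores its fuel once the fuel covers the remaining length (k ≥ 1)
theorem pvLoopB_fuel (Len : Int) (kn : Nat) (hk1 : 1 ≤ kn) :
    ∀ (f1 f2 : Nat) (l : List Char) (iN jN : Nat),
    l.length - iN ≤ f1 → l.length - iN ≤ f2 →
    pvLoopB (kn : Int) Len f1 l (iN : Int) (jN : Int) = pvLoopB (kn : Int) Len f2 l (iN : Int) (jN : Int) := by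
  intro f1
  induction f1 with
  | zero =>
    intro f2 l iN jN h1 h2
    have hle : l.length ≤ iN := by omega
    rw [pvLoopB_nil _ _ 0 _ _ _ hle, pvLoopB_nil _ _ f2 _ _ _ hle]
  | succ f ih =>
    intro f2 l iN jN h1 h2
    by_cases hlt : iN < l.length
    · cases f2 with
      | zero => omega
      | succ f2' =>
        simp only [pvLoopB]
        have hc : ((iN : Int) < (l.length : Int)) := by exact_mod_cast hlt
        simp only [hc, if_pos]
        have e1 : ((iN : Int) + (kn : Int)) = (((iN + kn : Nat)) : Int) := by push_cast; ring
        have e2 : ((jN : Int) + 1) = (((jN + 1 : Nat)) : Int) := by push_cast; ring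
        rw [e1, e2, ih f2' l (iN + kn) (jN + 1) (by omega) (by omega)]
    · have hle : l.length ≤ iN := by omega
      rw [pvLoopB_nil _ _ _ _ _ _ hle, pvLoopB_nil _ _ _ _ _ _ hle]

-- loopB only looks at the suffix from iN and the length
theorem pvLoopB_suffix (Len : Int) (kn : Nat) :
    ∀ (fuel : Nat) (l1 l2 : List Char) (iN jN : Nat),
    l1.length = l2.length → l1.drop iN = l2.drop iN →
    pvLoopB (kn : Int) Len fuel l1 (iN : Int) (jN : Int) = pvLoopB (kn : Int) Len fuel l2 (iN : Int) (jN : Int) := by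
  intro fuel
  induction fuel with
  | zero => intro _ _ _ _ _ _; rfl
  | succ f ih =>
    intro l1 l2 iN jN hlen hdrop
    simp only [pvLoopB, hlen]
    by_cases hc : ((iN : Int) < (l2.length : Int))
    · simp only [hc, if_pos]
      have e1 : ((iN : Int) + (kn : Int)) = (((iN + kn : Nat)) : Int) := by push_cast; ring
      have e2 : ((jN : Int) + 1) = (((jN + 1 : Nat)) : Int) := by push_cast; ring
      have hchunk : PySem.List.slice l1 (some (iN : Int)) (some ((iN : Int) + (kn : Int)))
          = PySem.List.slice l2 (some (iN : Int)) (some ((iN : Int) + (kn : Int))) := by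
        rw [PySem.List.slice_natCast_add, PySem.List.slice_natCast_add, hdrop]
      have hdrop' : l1.drop (iN + kn) = l2.drop (iN + kn) := by
        rw [← List.drop_drop, ← List.drop_drop, hdrop]
      rw [hchunk, e1, e2, ih l1 l2 (iN + kn) (jN + 1) hlen hdrop']
    · simp [hc]

-- once a complete even block no longer fits below Len, B copies the rest unchanged
theorem pvLoopB_tail (Len : Int) (kn : Nat) (hk1 : 1 ≤ kn) :
    ∀ (fuel : Nat) (l : List Char) (iN jN : Nat),
    l.length - iN ≤ fuel → Len < (iN : Int) + (kn : Int) →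
    (pvLoopB (kn : Int) Len fuel l (iN : Int) (jN : Int)).flatten = l.drop iN := by
  intro fuel
  induction fuel with
  | zero =>
    intro l iN jN h1 _
    have : l.length ≤ iN := by omega
    simp [pvLoopB, List.drop_eq_nil_of_le this]
  | succ f ih =>
    intro l iN jN h1 hLen
    by_cases hlt : iN < l.length
    · have hc : ((iN : Int) < (l.length : Int)) := by exact_mod_cast hlt
      simp only [pvLoopB, hc, if_pos]
      have hcond : ¬ ((iN : Int) + (kn : Int) ≤ Len) := by omega
      have e1 : ((iN : Int) + (kn : Int)) = (((iN + kn : Nat)) : Int) := by push_cast; ring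
      have e2 : ((jN : Int) + 1) = (((jN + 1 : Nat)) : Int) := by push_cast; ring
      rw [PySem.List.slice_natCast_add, if_neg (by simp [hcond])]
      have htail : (pvLoopB (kn : Int) Len f l ((iN + kn : Nat) : Int) ((jN + 1 : Nat) : Int)).flatten
          = l.drop (iN + kn) := ih l (iN + kn) (jN + 1) (by omega) (by push_cast; omega)
      rw [e1, e2]
      simp only [List.flatten_cons, htail]
      rw [← List.drop_drop, List.take_append_drop]
    · have hle : l.length ≤ iN := by omega
      rw [pvLoopB_nil _ _ _ _ _ _ hle]
      simp [List.drop_eq_nil_of_le hle]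

-- main invariant: A's loop equals the prefix kept so far plus B's remaining chunks
theorem pvMain (Len : Int) (kn : Nat) (hk1 : 1 ≤ kn) :
    ∀ (fuelA : Nat) (l : List Char) (iN : Nat) (fuelB : Nat) (jN : Nat),
    l.length - iN ≤ fuelA → l.length - iN ≤ fuelB → 2 ∣ jN →
    pvLoopA (kn : Int) Len fuelA l (iN : Int)
      = l.take iN ++ (pvLoopB (kn : Int) Len fuelB l (iN : Int) (jN : Int)).flatten := by
  intro fuelA
  induction fuelA with
  | zero =>
    intro l iN fuelB jN h1 h2 hj
    have hle : l.length ≤ iN := by omega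
    rw [pvLoopA, pvLoopB_nil _ _ _ _ _ _ hle]
    simp [List.take_of_length_le hle]
  | succ fA ih =>
    intro l iN fuelB jN h1 h2 hj
    by_cases hlt : iN < l.length
    · have hc : ((iN : Int) < (l.length : Int)) := by exact_mod_cast hlt
      by_cases hbrk : Len < (iN : Int) + (kn : Int)
      · -- A breaks; B copies the tail unchanged
        rw [pvLoopA, if_pos hc, if_pos (show (iN : Int) + (kn : Int) > Len from hbrk),
            pvLoopB_tail Len kn hk1 fuelB l iN jN h2 hbrk]
        exact (List.take_append_drop iN l).symm
      · -- A reverses the block at iN and jumps 2*kn; B emits two chunks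
        push_neg at hbrk
        simp only [pvLoopA, hc, if_pos]
        rw [if_neg (by omega)]
        set c1 : List Char := (l.drop iN).take kn with hc1
        have hslice : PySem.List.slice l (some (iN : Int)) (some ((iN : Int) + (kn : Int))) = c1 :=
          PySem.List.slice_natCast_add l iN kn
        have hpre : PySem.List.slice l none (some (iN : Int)) = l.take iN :=
          PySem.List.slice_to_natCast l iN
        have hpost : PySem.List.slice l (some ((iN : Int) + (kn : Int))) none = l.drop (iN + kn) := by
          have e1 : ((iN : Int) + (kn : Int)) = (((iN + kn : Nat)) : Int) := by push_cast; ring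
          rw [e1, PySem.List.slice_from_natCast]
        rw [hslice, hpre, hpost]
        set l' : List Char := l.take iN ++ c1.reverse ++ l.drop (iN + kn) with hl'
        have hlen_take : (l.take iN).length = iN := by simp; omega
        have hlenc1 : c1.length = min kn (l.length - iN) := by simp [hc1]
        have hlen' : l'.length = l.length := by
          simp [hl', hlenc1]; omega
        have e2 : (iN : Int) + 2 * (kn : Int) = (((iN + 2 * kn : Nat)) : Int) := by push_cast; ring
        rw [e2, ih l' (iN + 2 * kn) (l'.length - (iN + 2 * kn)) (jN + 2) (by omega) (le_refl _) (by omega)]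
        -- identify B's two chunks inside l'
        have hdrop' : l'.drop (iN + 2 * kn) = l.drop (iN + 2 * kn) := by
          by_cases hfit : iN + kn ≤ l.length
          · have hc1l : c1.length = kn := by rw [hlenc1]; omega
            rw [hl', List.drop_append,
                List.drop_eq_nil_of_le (by simp [hlen_take, hc1l]; omega), List.nil_append,
                List.drop_drop]
            congr 1
            simp [hlen_take, hc1l]
            omega
          · rw [List.drop_eq_nil_of_le (by rw [hlen']; omega),
                List.drop_eq_nil_of_le (by omega)]
        have htake' : l'.take (iN + 2 * kn) = l.take iN ++ c1.reverse ++ (l.drop (iN + kn)).take kn := by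
          by_cases hfit : iN + kn ≤ l.length
          · have hc1l : c1.length = kn := by rw [hlenc1]; omega
            rw [hl', List.take_append,
                List.take_of_length_le (by simp [hlen_take, hc1l]; omega)]
            congr 1
            have hal : (l.take iN ++ c1.reverse).length = iN + kn := by
              simp [hlen_take, hc1l]
            rw [hal]
            congr 1
            omega
          · have hnil : l.drop (iN + kn) = [] := List.drop_eq_nil_of_le (by omega)
            rw [List.take_of_length_le (by rw [hlen']; omega), hl', hnil]
            simp
        rw [htake']
        -- unfold B twice
        cases fuelB with
        | zero => omega
        | succ fB =>
          rw [pvLoopB]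
          simp only [hc, if_pos]
          rw [hslice]
          have hjmod : PySem.Int.mod (jN : Int) 2 = 0 := by
            have hd : (2 : Int) ∣ (jN : Int) := by exact_mod_cast Int.natCast_dvd_natCast.mpr hj
            exact (PySem.Int.mod_eq_zero_iff_dvd _ _).mpr hd
          have hcond : (PySem.Int.mod (jN : Int) 2 == 0 && decide ((iN : Int) + (kn : Int) ≤ Len)) = true := by
            rw [hjmod]
            simp [hbrk]
          rw [if_pos hcond]
          -- second chunk
          have e3 : ((iN : Int) + (kn : Int)) = (((iN + kn : Nat)) : Int) := by push_cast; ring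
          have e4 : ((jN : Int) + 1) = (((jN + 1 : Nat)) : Int) := by push_cast; ring
          rw [e3, e4]
          by_cases hin2 : iN + kn < l.length
          · cases fB with
            | zero => omega
            | succ fB2 =>
              rw [pvLoopB]
              have hc2 : (((iN + kn : Nat) : Int) < (l.length : Int)) := by exact_mod_cast hin2
              simp only [hc2, if_pos]
              have hodd : PySem.Int.mod ((jN + 1 : Nat) : Int) 2 ≠ 0 := by
                intro h
                rw [PySem.Int.mod_eq_zero_iff_dvd] at h
                have h' : (2 : Nat) ∣ (jN + 1) := by exact_mod_cast h
                obtain ⟨p, hp⟩ := hj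
                omega
              have hoddb : (PySem.Int.mod ((jN + 1 : Nat) : Int) 2 == 0) = false :=
                beq_eq_false_iff_ne.mpr hodd
              rw [if_neg (by rw [hoddb]; simp)]
              have e5 : (((iN + kn : Nat)) : Int) + (kn : Int) = (((iN + 2 * kn : Nat)) : Int) := by push_cast; ring
              have e6 : (((jN + 1 : Nat)) : Int) + 1 = (((jN + 2 : Nat)) : Int) := by push_cast; ring
              rw [PySem.List.slice_natCast_add, e5, e6]
              rw [pvLoopB_fuel Len kn hk1 fB2 (l'.length - (iN + 2 * kn)) l (iN + 2 * kn) (jN + 2) (by omega) (by omega)]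
              rw [pvLoopB_suffix Len kn (l'.length - (iN + 2 * kn)) l' l (iN + 2 * kn) (jN + 2) hlen' hdrop']
              simp [List.append_assoc]
          · -- no second chunk fits: both remainders are empty
            have hnil2 : l.drop (iN + kn) = [] := List.drop_eq_nil_of_le (by omega)
            have hB0 : pvLoopB (kn : Int) Len fB l ((iN + kn : Nat) : Int) ((jN + 1 : Nat) : Int) = [] :=
              pvLoopB_nil _ _ _ _ _ _ (by omega)
            have hB1 : pvLoopB (kn : Int) Len (l'.length - (iN + 2 * kn)) l' ((iN + 2 * kn : Nat) : Int) ((jN + 2 : Nat) : Int) = [] :=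
              pvLoopB_nil _ _ _ _ _ _ (by rw [hlen']; omega)
            rw [hB0, hB1]
            simp [hnil2]
    · -- past the end: A returns l, B yields no chunks
      have hle : l.length ≤ iN := by omega
      have hc : ¬ ((iN : Int) < (l.length : Int)) := by exact_mod_cast not_lt.mpr hle
      rw [pvLoopA]
      simp only [hc, if_neg, if_false]
      rw [pvLoopB_nil _ _ _ _ _ _ hle]
      simp [List.take_of_length_le hle]

-- ===== VERDICT (by name: the statement is the Claim_ definition above) =====
theorem revAlternateK_spec : Claim_equal_revAlternateK := by
  intro s k Len _ hpre
  unfold Spec_revAlternateK revAlternateK revAlternateK_alt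
  rcases hpre with hk | ⟨hs, hk0⟩
  · obtain ⟨kn, rfl⟩ : ∃ kn : Nat, k = (kn : Int) := ⟨k.toNat, (Int.toNat_of_nonneg (by omega)).symm⟩
    have hk1 : 1 ≤ kn := by exact_mod_cast hk
    have hb := pvBridge Len kn hk1 s.toList (s.toList.length + 1) 0 0 (by omega)
    simp only [Nat.cast_zero] at hb
    rw [hb]
    have h := pvMain Len kn hk1 (s.toList.length + 1) s.toList 0 (s.toList.length + 1) 0 (by omega) (by omega) ⟨0, rfl⟩
    simp only [Nat.cast_zero] at h
    rw [h]
    simp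
  · subst hs
    have hr : PySem.List.pyRange 0 ((String.toList "").length : Int) k = [] := by
      simp [PySem.List.pyRange]
    rw [hr, PySem.List.enumerate_nil]
    rfl
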